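-- pv_equiv track=rewrite | github.com/mokoconsulting-tech/MokoStandards | scripts/lib/input_validator.py | sanitize_shell_input
-- ===== SOURCE A (Python) =====
-- def sanitize_shell_input(input_str: str) -> str:
--     """Sanitize input to prevent shell injection.
--
--     Args:
--         input_str: Input string to sanitize
--
--     Returns:
--         Sanitized string
--     """
--     if not isinstance(input_str, str):
--         return str(input_str)
--
--     # Remove dangerous shell characters
--     dangerous_chars = [';', '&', '|', '`', '$', '(', ')', '<', '>', '\n', '\r']
--     sanitized = input_str
--
--     for char in dangerous_chars:
--         sanitized = sanitized.replace(char, '')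
--
--     return sanitized.strip()
-- ===== SOURCE B (Python) =====
-- def sanitize_shell_input(input_str: str) -> str:
--     """Sanitize input to prevent shell injection (single-pass filter)."""
--     if not isinstance(input_str, str):
--         return str(input_str)
--     dangerous = {';', '&', '|', '`', '$', '(', ')', '<', '>', '\n', '\r'}
--     return ''.join(c for c in input_str if c not in dangerous).strip()
-- ===== Notes on version B (the rewrite author's own statement) =====
-- stated objective: idiomatic
-- what changed: A scans the whole string once per blacklist character with eleven sequential str.replace passes; B makes a single pass over the input keeping characters not in a blacklist set, then strips.
import Mathlib
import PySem

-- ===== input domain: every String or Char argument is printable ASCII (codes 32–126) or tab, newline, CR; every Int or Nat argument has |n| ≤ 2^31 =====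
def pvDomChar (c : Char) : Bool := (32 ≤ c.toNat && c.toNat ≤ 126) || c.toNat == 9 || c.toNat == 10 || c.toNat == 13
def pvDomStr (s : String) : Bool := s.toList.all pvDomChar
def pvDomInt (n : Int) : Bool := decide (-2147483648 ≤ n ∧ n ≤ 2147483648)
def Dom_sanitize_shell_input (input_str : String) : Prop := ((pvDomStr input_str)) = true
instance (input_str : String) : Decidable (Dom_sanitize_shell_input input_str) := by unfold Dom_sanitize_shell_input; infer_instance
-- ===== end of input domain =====

-- B replaces A's eleven whole-string `.replace` passes by one single pass over the
-- input keeping characters outside a blacklist set (objective: idiomatic).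

-- ===== PORT A =====
-- A's `isinstance` guard is vacuous under the String type and is not ported.
def sanitize_shell_input (input_str : String) : String :=
  let dangerous_chars : List String := [";", "&", "|", "`", "$", "(", ")", "<", ">", "\n", "\r"]
  let sanitized := dangerous_chars.foldl (fun acc ch => PySem.Str.replace acc ch "") input_str
  PySem.Str.strip sanitized

-- ===== PORT B =====
-- the Python `dangerous` set of characters
def pvDangerous : List Char := [';', '&', '|', '`', '$', '(', ')', '<', '>', '\n', '\r']

def sanitize_shell_input_alt (input_str : String) : String :=
  PySem.Str.strip (String.ofList (input_str.toList.filter (fun c => !(pvDangerous.contains c))))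

-- ===== PRECONDITION & SPEC =====
def Spec_sanitize_shell_input (input_str : String) (out : String) : Prop := out = sanitize_shell_input_alt input_str
instance (input_str : String) (out : String) : Decidable (Spec_sanitize_shell_input input_str out) := by unfold Spec_sanitize_shell_input; infer_instance

-- ===== CLAIM (what is proved, stated in full; the proofs are below) =====
def Claim_equal_sanitize_shell_input : Prop := ∀ (input_str : String), Dom_sanitize_shell_input input_str → Spec_sanitize_shell_input input_str (sanitize_shell_input input_str)

-- ===== LEMMAS AND PROOFS =====

-- A's `.replace(char, '')` for a single character char, with enough fuel, deletes
-- exactly the occurrences of char: the loop of replace.go is a filter.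
theorem go_single (c : Char) : ∀ (fuel : Nat) (l acc : List Char), l.length ≤ fuel →
    PySem.Chars.replace.go [c] [] fuel l acc = acc.reverse ++ l.filter (fun x => !(x == c)) := by
  intro fuel
  induction fuel with
  | zero => intro l acc h; simp at h; simp [h, PySem.Chars.replace.go]
  | succ n ih =>
    intro l acc h
    cases l with
    | nil => simp [PySem.Chars.replace.go]
    | cons x t =>
      simp only [PySem.Chars.replace.go]
      by_cases hx : x = c
      · simp [hx, List.isPrefixOf, ih t acc (by simpa using h)]
      · have hxc : (x == c) = false := by simp [hx]
        simp [List.isPrefixOf, Ne.symm hx, ih t (x :: acc) (by simpa using h), List.filter, hxc]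

theorem replace_single (l : List Char) (c : Char) :
    PySem.Chars.replace l [c] [] = l.filter (fun x => !(x == c)) := by
  simp [PySem.Chars.replace, go_single c l.length l [] le_rfl]

-- string-level form of replace_single, for a single-character literal
theorem str_replace_single (s : String) (c : Char) (cs : String) (hc : cs.toList = [c]) :
    (PySem.Str.replace s cs "").toList = s.toList.filter (fun x => !(x == c)) := by
  simp [PySem.Str.toList_replace, hc, replace_single]

theorem sanitize_eq (s : String) : sanitize_shell_input s = sanitize_shell_input_alt s := by
  apply String.toList_inj.mp
  simp only [sanitize_shell_input, sanitize_shell_input_alt, List.foldl]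
  simp only [PySem.Str.toList_strip, String.toList_ofList,
    str_replace_single _ ';' ";" rfl, str_replace_single _ '&' "&" rfl,
    str_replace_single _ '|' "|" rfl, str_replace_single _ '`' "`" rfl,
    str_replace_single _ '$' "$" rfl, str_replace_single _ '(' "(" rfl,
    str_replace_single _ ')' ")" rfl, str_replace_single _ '<' "<" rfl,
    str_replace_single _ '>' ">" rfl, str_replace_single _ '\n' "\n" rfl,
    str_replace_single _ '\r' "\r" rfl, List.filter_filter]
  congr 1
  apply List.filter_congr
  intro x _
  simp only [pvDangerous, List.contains_cons, List.contains_nil, Bool.or_false]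
  rw [Bool.eq_iff_iff]
  simp only [Bool.and_eq_true, Bool.not_eq_true', beq_eq_false_iff_ne, ne_eq,
    Bool.or_eq_false_iff]
  tauto

-- ===== VERDICT (by name: the statement is the Claim_ definition above) =====
theorem sanitize_shell_input_spec : Claim_equal_sanitize_shell_input := by
  intro s _
  exact sanitize_eq s
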